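-- pv_equiv track=rewrite | github.com/psypherion/preptify | categorizer.py | categorize_topics
-- ===== SOURCE A (Python) =====
-- def categorize_topics(topic_frequencies):
--     """
--     Categorize topics based on their frequencies.
--
--     Args:
--         topic_frequencies (list): List of tuples with topic and frequency.
--
--     Returns:
--         dict: Categorized topics into most, moderate, and least important.
--     """
--     topic_frequencies.sort(key=lambda x: x[1], reverse=True)
--     max_freq = topic_frequencies[0][1]
--     min_freq = topic_frequencies[-1][1]
--     range_diff = max_freq - min_freq
--
--     range_1 = max_freq - range_diff // 3
--     range_2 = range_1 - range_diff // 3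
--
--     return {
--         "most_important": [(topic, freq) for topic, freq in topic_frequencies if freq >= range_1],
--         "moderately_important": [(topic, freq) for topic, freq in topic_frequencies if range_2 <= freq < range_1],
--         "least_important": [(topic, freq) for topic, freq in topic_frequencies if freq < range_2]
--     }, (range_1, range_2)
-- ===== SOURCE B (Python) =====
-- def categorize_topics(topic_frequencies):
--     """Same result as A: sort once, then locate the two tier boundaries by
--     binary search and return three contiguous slices (A filters the whole
--     list three times). Sorts the argument in place, like A."""
--     topic_frequencies.sort(key=lambda x: x[1], reverse=True)
--     max_freq = topic_frequencies[0][1]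
--     min_freq = topic_frequencies[-1][1]
--     range_diff = max_freq - min_freq
--
--     range_1 = max_freq - range_diff // 3
--     range_2 = range_1 - range_diff // 3
--
--     def first_below(bound):
--         # first index whose frequency is < bound (list is non-increasing)
--         lo, hi = 0, len(topic_frequencies)
--         while lo < hi:
--             mid = (lo + hi) // 2
--             if topic_frequencies[mid][1] >= bound:
--                 lo = mid + 1
--             else:
--                 hi = mid
--         return lo
--
--     i1 = first_below(range_1)
--     i2 = first_below(range_2)
--     return {
--         "most_important": topic_frequencies[:i1],
--         "moderately_important": topic_frequencies[i1:i2],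
--         "least_important": topic_frequencies[i2:],
--     }, (range_1, range_2)
-- ===== Notes on version B (the rewrite author's own statement) =====
-- stated objective: alternative
-- what changed: After the same in-place sort, B finds the two tier boundaries by binary search and returns three contiguous slices instead of filtering the whole list three times as A does.
import Mathlib
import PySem

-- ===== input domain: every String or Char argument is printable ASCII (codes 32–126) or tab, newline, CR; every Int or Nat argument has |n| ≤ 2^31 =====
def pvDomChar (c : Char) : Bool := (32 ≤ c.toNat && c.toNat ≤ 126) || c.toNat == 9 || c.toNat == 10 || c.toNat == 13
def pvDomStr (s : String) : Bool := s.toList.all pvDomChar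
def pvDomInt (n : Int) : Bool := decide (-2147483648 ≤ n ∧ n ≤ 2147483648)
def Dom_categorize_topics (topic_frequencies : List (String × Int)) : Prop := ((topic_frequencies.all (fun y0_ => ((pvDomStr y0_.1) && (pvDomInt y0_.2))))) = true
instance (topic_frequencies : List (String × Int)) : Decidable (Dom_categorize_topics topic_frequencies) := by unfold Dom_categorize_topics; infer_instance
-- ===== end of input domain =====

-- B replaces A's three whole-list filters by two binary searches and three slices
-- over the same sorted list; equivalence is about the RETURN value (both sort the
-- argument in place in Python).

-- ===== PORT A =====
def categorize_topics (topic_frequencies : List (String × Int)) : (List (String × List (String × Int))) × (Int × Int) :=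
  let s := PySem.List.sorted topic_frequencies (fun x => x.2) true
  let max_freq := (PySem.List.pyGetD s 0 ("", 0)).2      -- topic_frequencies[0][1]; IndexError on [] excluded by Pre_
  let min_freq := (PySem.List.pyGetD s (-1) ("", 0)).2   -- topic_frequencies[-1][1]
  let range_diff := max_freq - min_freq
  let range_1 := max_freq - PySem.Int.floordiv range_diff 3
  let range_2 := range_1 - PySem.Int.floordiv range_diff 3
  ([("most_important", s.filter (fun x => decide (range_1 ≤ x.2))),
    ("moderately_important", s.filter (fun x => decide (range_2 ≤ x.2 ∧ x.2 < range_1))),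
    ("least_important", s.filter (fun x => decide (x.2 < range_2)))],
   (range_1, range_2))

-- ===== PORT B =====
-- Source B's hand-written binary search: first index in s whose frequency is < bound.
-- The fuel argument only makes the while-loop total; hi - lo ≤ fuel holds at every call.
def firstBelow (s : List (String × Int)) (bound : Int) (lo hi fuel : Nat) : Nat :=
  match fuel with
  | 0 => lo
  | fuel + 1 =>
    if lo < hi then
      let mid := (lo + hi) / 2  -- (lo + hi) // 2: Nat division is exact here, lo and hi are nonnegative
      if bound ≤ (PySem.List.pyGetD s (mid : Int) ("", 0)).2 then
        firstBelow s bound (mid + 1) hi fuel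
      else
        firstBelow s bound lo mid fuel
    else lo

def categorize_topics_alt (topic_frequencies : List (String × Int)) : (List (String × List (String × Int))) × (Int × Int) :=
  let s := PySem.List.sorted topic_frequencies (fun x => x.2) true
  let max_freq := (PySem.List.pyGetD s 0 ("", 0)).2
  let min_freq := (PySem.List.pyGetD s (-1) ("", 0)).2
  let range_diff := max_freq - min_freq
  let range_1 := max_freq - PySem.Int.floordiv range_diff 3
  let range_2 := range_1 - PySem.Int.floordiv range_diff 3
  let i1 := firstBelow s range_1 0 s.length s.length
  let i2 := firstBelow s range_2 0 s.length s.length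
  ([("most_important", PySem.List.slice s none (some (i1 : Int))),
    ("moderately_important", PySem.List.slice s (some (i1 : Int)) (some (i2 : Int))),
    ("least_important", PySem.List.slice s (some (i2 : Int)) none)],
   (range_1, range_2))

-- ===== PRECONDITION & SPEC =====
-- Pre_ excludes only the empty list, on which A raises IndexError (topic_frequencies[0]).
def Pre_categorize_topics (topic_frequencies : List (String × Int)) : Prop := topic_frequencies ≠ []
instance (topic_frequencies : List (String × Int)) : Decidable (Pre_categorize_topics topic_frequencies) := by unfold Pre_categorize_topics; infer_instance
def pvWitness_categorize_topics : (List (String × Int)) := [("a", 3), ("b", 1), ("c", 7)]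

def Spec_categorize_topics (topic_frequencies : List (String × Int)) (out : (List (String × List (String × Int))) × (Int × Int)) : Prop := out = categorize_topics_alt topic_frequencies
instance (topic_frequencies : List (String × Int)) (out : (List (String × List (String × Int))) × (Int × Int)) : Decidable (Spec_categorize_topics topic_frequencies out) := by unfold Spec_categorize_topics; infer_instance

-- ===== CLAIM (what is proved, stated in full; the proofs are below) =====
def Claim_equal_categorize_topics : Prop := ∀ (topic_frequencies : List (String × Int)), Dom_categorize_topics topic_frequencies → Pre_categorize_topics topic_frequencies → Spec_categorize_topics topic_frequencies (categorize_topics topic_frequencies)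

-- ===== LEMMAS AND PROOFS =====

-- On a list whose i-th element satisfies q exactly for k1 ≤ i < k2, filter is the slice [k1:k2].
theorem filter_eq_drop_take {α : Type} (s : List α) (q : α → Bool) (k1 k2 : Nat)
    (h12 : k1 ≤ k2) (hk2 : k2 ≤ s.length)
    (h : ∀ i (hi : i < s.length), q s[i] = true ↔ (k1 ≤ i ∧ i < k2)) :
    s.filter q = (s.drop k1).take (k2 - k1) := by
  induction s generalizing k1 k2 with
  | nil => simp
  | cons a t ih =>
    rcases Nat.eq_zero_or_pos k1 with h1 | h1
    · subst h1
      rcases Nat.eq_zero_or_pos k2 with h2 | h2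
      · subst h2
        simp only [List.drop_zero, Nat.sub_self, List.take_zero]
        rw [List.filter_eq_nil_iff]
        intro x hx
        obtain ⟨i, hi, rfl⟩ := List.getElem_of_mem hx
        simp [h i hi]
      · obtain ⟨j, rfl⟩ := Nat.exists_eq_add_of_lt h2
        have ha : q a = true := (h 0 (by simp)).2 (by omega)
        have ht : t.filter q = t.take j := by
          have := ih 0 j (by omega) (by simp at hk2; omega) (by
            intro i hi
            have h' := h (i + 1) (by simp; omega)
            simp only [List.getElem_cons_succ] at h'
            rw [h']; omega)
          simpa using this
        simp only [List.filter_cons, ha, if_pos, List.drop_zero, Nat.sub_zero,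
          Nat.zero_add, List.take_succ_cons]
        rw [ht]
    · obtain ⟨m, rfl⟩ := Nat.exists_eq_add_of_lt h1
      have ha : q a = false := by
        rcases hq : q a with _ | _
        · rfl
        · have := (h 0 (by simp)).1 (by simpa using hq)
          omega
      obtain ⟨c, rfl⟩ : ∃ c, k2 = c + 1 := ⟨k2 - 1, by omega⟩
      have ht : t.filter q = (t.drop m).take (c - m) := by
        apply ih m c (by omega) (by simp at hk2; omega)
        intro i hi
        have h' := h (i + 1) (by simp; omega)
        simp only [List.getElem_cons_succ] at h'
        rw [h']; omega
      simp only [List.filter_cons, ha, Bool.false_eq_true, if_neg, not_false_iff,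
        Nat.zero_add, List.drop_succ_cons]
      rw [ht]
      congr 1
      omega

-- The binary search returns k whenever the i-th frequency is ≥ bound exactly for i < k.
theorem firstBelow_eq (s : List (String × Int)) (bound : Int) (k : Nat)
    (hchar : ∀ i (hi : i < s.length), bound ≤ (s[i]).2 ↔ i < k) :
    ∀ fuel lo hi, hi - lo ≤ fuel → lo ≤ k → k ≤ hi → hi ≤ s.length →
      firstBelow s bound lo hi fuel = k := by
  intro fuel
  induction fuel with
  | zero =>
    intro lo hi hfuel hlo hhi hlen
    simp only [firstBelow]
    omega
  | succ n ih =>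
    intro lo hi hfuel hlo hhi hlen
    rw [firstBelow]
    by_cases hlt : lo < hi
    · simp only [if_pos hlt]
      have hmid1 : lo ≤ (lo + hi) / 2 := by omega
      have hmid2 : (lo + hi) / 2 < hi := by omega
      have hmlen : (lo + hi) / 2 < s.length := by omega
      have hget : (PySem.List.pyGetD s (((lo + hi) / 2 : Nat) : Int) ("", 0)) = s[(lo + hi) / 2] := by
        rw [PySem.List.pyGetD_natCast]
        exact List.getD_eq_getElem _ _ hmlen
      by_cases hc : bound ≤ (s[(lo + hi) / 2]).2
      · have hklt : (lo + hi) / 2 < k := (hchar _ hmlen).1 hc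
        rw [if_pos (by rw [hget]; exact hc)]
        exact ih _ _ (by omega) (by omega) hhi hlen
      · have hkge : k ≤ (lo + hi) / 2 := by
          by_contra hlt'
          exact hc ((hchar _ hmlen).2 (by omega))
        rw [if_neg (by rw [hget]; exact hc)]
        exact ih _ _ (by omega) hlo (by omega) (by omega)
    · simp only [if_neg hlt]
      omega

-- Characterisation of the takeWhile boundary on a frequency-non-increasing list.
theorem takeWhile_char (s : List (String × Int)) (bound : Int)
    (hp : s.Pairwise (fun a b => b.2 ≤ a.2)) :
    ∀ i (hi : i < s.length),
      bound ≤ (s[i]).2 ↔ i < (s.takeWhile (fun x => decide (bound ≤ x.2))).length := by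
  induction s with
  | nil => intro i hi; simp at hi
  | cons a t ih =>
    intro i hi
    by_cases ha : bound ≤ a.2
    · rw [List.takeWhile_cons_of_pos (by simpa using ha)]
      cases i with
      | zero => simpa using ha
      | succ j =>
        simp only [List.getElem_cons_succ, List.length_cons, Nat.add_lt_add_iff_right]
        exact ih (List.pairwise_cons.1 hp).2 j (by simpa using hi)
    · rw [List.takeWhile_cons_of_neg (by simpa using ha)]
      cases i with
      | zero => simpa using ha
      | succ j =>
        simp only [List.getElem_cons_succ, List.length_nil]
        constructor
        · intro hb
          have hj : t[j]'(by simpa using hi) ∈ t := List.getElem_mem _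
          exact absurd (le_trans hb ((List.pairwise_cons.1 hp).1 _ hj)) ha
        · intro h
          exact absurd h (by omega)

-- ===== VERDICT (by name: the statement is the Claim_ definition above) =====
theorem categorize_topics_spec : Claim_equal_categorize_topics := by
  intro tf _ hpre
  unfold Spec_categorize_topics categorize_topics categorize_topics_alt
  simp only []
  set s := PySem.List.sorted tf (fun x => x.2) true with hs
  have hne : s ≠ [] := by
    rw [hs, Ne, PySem.List.sorted_eq_nil_iff]; exact hpre
  have hp : s.Pairwise (fun a b => b.2 ≤ a.2) := by
    rw [hs]; exact PySem.List.sorted_pairwise_rev tf (fun x => x.2)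
  set max_freq := (PySem.List.pyGetD s 0 ("", 0)).2 with hmax
  set min_freq := (PySem.List.pyGetD s (-1) ("", 0)).2 with hmin
  set range_diff := max_freq - min_freq with hdiff
  set r1 := max_freq - PySem.Int.floordiv range_diff 3 with hr1
  set r2 := r1 - PySem.Int.floordiv range_diff 3 with hr2
  -- range_diff ≥ 0, hence r2 ≤ r1
  have hlen0 : 0 < s.length := List.length_pos_iff.2 hne
  have hmax' : max_freq = (s[0]'hlen0).2 := by
    rw [hmax, PySem.List.pyGetD_zero, List.getD_eq_getElem _ _ hlen0]
  have hmin' : min_freq = (s[s.length - 1]'(by omega)).2 := by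
    rw [hmin, PySem.List.pyGetD_neg_one s ("", 0) hne, List.getLast_eq_getElem]
  have hdnn : 0 ≤ range_diff := by
    rw [hdiff, hmax', hmin', sub_nonneg]
    rcases Nat.eq_zero_or_pos (s.length - 1) with h0 | h0
    · simp [h0]
    · exact (List.pairwise_iff_getElem.1 hp) 0 (s.length - 1) hlen0 (by omega) h0
  have hq3 : 0 ≤ PySem.Int.floordiv range_diff 3 := by
    rw [PySem.Int.floordiv_eq_ediv_of_pos (by omega)]
    exact Int.ediv_nonneg hdnn (by omega)
  have hr21 : r2 ≤ r1 := by rw [hr2]; omega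
  -- boundaries
  set k1 := (s.takeWhile (fun x => decide (r1 ≤ x.2))).length with hk1
  set k2 := (s.takeWhile (fun x => decide (r2 ≤ x.2))).length with hk2
  have hc1 := takeWhile_char s r1 hp
  have hc2 := takeWhile_char s r2 hp
  rw [← hk1] at hc1
  rw [← hk2] at hc2
  have hk1le : k1 ≤ s.length := by
    simpa [hk1] using (List.takeWhile_prefix (fun x => decide (r1 ≤ x.2)) (l := s)).length_le
  have hk2le : k2 ≤ s.length := by
    simpa [hk2] using (List.takeWhile_prefix (fun x => decide (r2 ≤ x.2)) (l := s)).length_le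
  have hk12 : k1 ≤ k2 := by
    by_contra hlt
    have h2 : k2 < s.length := by omega
    have : r1 ≤ (s[k2]).2 := (hc1 k2 h2).2 (by omega)
    have : r2 ≤ (s[k2]).2 := le_trans hr21 this
    have := (hc2 k2 h2).1 this
    omega
  have hf1 : firstBelow s r1 0 s.length s.length = k1 :=
    firstBelow_eq s r1 k1 hc1 s.length 0 s.length (by omega) (by omega) hk1le (le_refl _)
  have hf2 : firstBelow s r2 0 s.length s.length = k2 :=
    firstBelow_eq s r2 k2 hc2 s.length 0 s.length (by omega) (by omega) hk2le (le_refl _)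
  rw [hf1, hf2]
  -- the three buckets
  have hb1 : s.filter (fun x => decide (r1 ≤ x.2)) = PySem.List.slice s none (some (k1 : Int)) := by
    rw [PySem.List.slice_to_natCast]
    have := filter_eq_drop_take s (fun x => decide (r1 ≤ x.2)) 0 k1 (by omega) hk1le
      (by intro i hi; simpa using (hc1 i hi).trans (by omega))
    simpa using this
  have hb2 : s.filter (fun x => decide (r2 ≤ x.2 ∧ x.2 < r1))
      = PySem.List.slice s (some (k1 : Int)) (some (k2 : Int)) := by
    rw [PySem.List.slice_natCast]
    apply filter_eq_drop_take s _ k1 k2 hk12 hk2le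
    intro i hi
    have h1 := hc1 i hi
    have h2 := hc2 i hi
    simp only [decide_eq_true_eq]
    constructor
    · rintro ⟨ha, hb⟩
      refine ⟨?_, h2.1 ha⟩
      by_contra hik
      exact absurd (h1.2 (by omega)) (by omega)
    · rintro ⟨ha, hb⟩
      refine ⟨h2.2 hb, ?_⟩
      by_contra hge
      exact absurd (h1.1 (by omega)) (by omega)
  have hb3 : s.filter (fun x => decide (x.2 < r2)) = PySem.List.slice s (some (k2 : Int)) none := by
    rw [PySem.List.slice_from_natCast]
    have := filter_eq_drop_take s (fun x => decide (x.2 < r2)) k2 s.length hk2le (le_refl _)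
      (by
        intro i hi
        have h2 := hc2 i hi
        simp only [decide_eq_true_eq]
        omega)
    rw [this]
    exact List.take_of_length_le (by simp)
  rw [hb1, hb2, hb3]
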